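-- pv_equiv track=rewrite | github.com/Basartemiz/resume_maker_app | backend/resume_maker/resume/utils/parser.py | _collect_key_skills
-- ===== SOURCE A (Python) =====
-- from typing import Any, Dict, List, Optional
--
-- def _collect_key_skills(sections: List[Dict[str, Any]], k: int = 5) -> List[str]:
--     flat: List[str] = []
--     for sec in sections:
--         for it in (sec.get("items") or []):
--             if isinstance(it, str):
--                 flat.append(it)
--     out, seen = [], set()
--     for x in flat:
--         if x not in seen:
--             out.append(x); seen.add(x)
--         if len(out) >= k: break
--     return out
-- ===== SOURCE B (Python) =====
-- from typing import Any, Dict, List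
--
-- def _collect_key_skills(sections: List[Dict[str, Any]], k: int = 5) -> List[str]:
--     # Single fused pass: no intermediate flat list; return as soon as k unique skills found.
--     out: List[str] = []
--     seen = set()
--     for sec in sections:
--         for it in (sec.get("items") or []):
--             if isinstance(it, str) and it not in seen:
--                 out.append(it)
--                 seen.add(it)
--                 if len(out) >= k:
--                     return out
--     return out
-- ===== Notes on version B (the rewrite author's own statement) =====
-- stated objective: simpler
-- what changed: B fuses A's two passes (build a full flat list, then dedup-and-truncate it) into a single traversal over sections and items that maintains out/seen directly and returns as soon as k unique skills are collected, never materialising the flat list.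
import Mathlib
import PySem

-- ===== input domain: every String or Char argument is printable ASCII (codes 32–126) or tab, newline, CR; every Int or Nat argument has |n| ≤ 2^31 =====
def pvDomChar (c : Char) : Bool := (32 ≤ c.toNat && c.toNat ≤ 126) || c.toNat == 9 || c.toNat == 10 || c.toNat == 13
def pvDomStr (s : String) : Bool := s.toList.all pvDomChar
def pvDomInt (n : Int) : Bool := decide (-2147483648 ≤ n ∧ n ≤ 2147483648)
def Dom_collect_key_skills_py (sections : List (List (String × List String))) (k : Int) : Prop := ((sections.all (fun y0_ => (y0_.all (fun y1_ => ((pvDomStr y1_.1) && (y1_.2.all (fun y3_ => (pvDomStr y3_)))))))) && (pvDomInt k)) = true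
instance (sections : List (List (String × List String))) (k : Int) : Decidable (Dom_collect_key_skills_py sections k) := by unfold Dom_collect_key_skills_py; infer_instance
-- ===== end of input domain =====

-- B fuses A's two passes (flatten, then dedup-truncate) into one early-exiting traversal with no intermediate flat list; return value proved equal to A's.


-- ===== PORT A =====
-- 'for x in flat: if x not in seen: out.append(x); seen.add(x); if len(out) >= k: break'
def pvLoopA : List String → List String → PySem.Set String → Int → List String
  | [], out, _, _ => out
  | x :: rest, out, seen, k =>
      let p := if PySem.Set.contains seen x then (out, seen) else (out ++ [x], PySem.Set.add seen x)
      if (p.1.length : Int) ≥ k then p.1 else pvLoopA rest p.1 p.2 k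

def collect_key_skills_py (sections : List (List (String × List String))) (k : Int) : List String :=
  -- flat: append every item of sec.get("items") or [] (isinstance(it, str) is always true at this type)
  let flat := sections.foldl
    (fun acc sec => ((PySem.Dict.get? (PySem.Dict.mk sec) "items").getD []).foldl (fun a it => a ++ [it]) acc) []
  pvLoopA flat [] PySem.Set.empty k

-- ===== PORT B =====
-- inner loop of Source B: returns (out, seen, done); done = the early 'return out' fired
def pvLoopBItems : List String → List String → PySem.Set String → Int → List String × PySem.Set String × Bool
  | [], out, seen, _ => (out, seen, false)
  | it :: rest, out, seen, k =>
      if PySem.Set.contains seen it then pvLoopBItems rest out seen k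
      else
        let out' := out ++ [it]
        if (out'.length : Int) ≥ k then (out', PySem.Set.add seen it, true)
        else pvLoopBItems rest out' (PySem.Set.add seen it) k

def pvLoopBSecs : List (List (String × List String)) → List String → PySem.Set String → Int → List String
  | [], out, _, _ => out
  | sec :: rest, out, seen, k =>
      match pvLoopBItems ((PySem.Dict.get? (PySem.Dict.mk sec) "items").getD []) out seen k with
      | (out', _, true) => out'
      | (out', seen', false) => pvLoopBSecs rest out' seen' k

def collect_key_skills_py_alt (sections : List (List (String × List String))) (k : Int) : List String :=
  pvLoopBSecs sections [] PySem.Set.empty k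

-- ===== PRECONDITION & SPEC =====
def Spec_collect_key_skills_py (sections : List (List (String × List String))) (k : Int) (out : List String) : Prop := out = collect_key_skills_py_alt sections k
instance (sections : List (List (String × List String))) (k : Int) (out : List String) : Decidable (Spec_collect_key_skills_py sections k out) := by unfold Spec_collect_key_skills_py; infer_instance

-- ===== CLAIM (what is proved, stated in full; the proofs are below) =====
def Claim_equal_collect_key_skills_py : Prop := ∀ (sections : List (List (String × List String))) (k : Int), Dom_collect_key_skills_py sections k → Spec_collect_key_skills_py sections k (collect_key_skills_py sections k)

-- ===== LEMMAS AND PROOFS =====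

-- one unfolding step of each loop, with the membership test and length arithmetic normalised
lemma pvLoopA_cons (x : String) (rest out : List String) (seen : PySem.Set String) (k : Int) :
    pvLoopA (x :: rest) out seen k =
      if x ∈ seen then (if (out.length : Int) ≥ k then out else pvLoopA rest out seen k)
      else (if (out.length : Int) + 1 ≥ k then out ++ [x] else pvLoopA rest (out ++ [x]) (PySem.Set.add seen x) k) := by
  by_cases h : x ∈ seen <;> simp [pvLoopA, PySem.Set.contains, h]

lemma pvLoopBItems_cons (x : String) (rest out : List String) (seen : PySem.Set String) (k : Int) :
    pvLoopBItems (x :: rest) out seen k =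
      if x ∈ seen then pvLoopBItems rest out seen k
      else if (out.length : Int) + 1 ≥ k then (out ++ [x], PySem.Set.add seen x, true)
      else pvLoopBItems rest (out ++ [x]) (PySem.Set.add seen x) k := by
  by_cases h : x ∈ seen <;> simp [pvLoopBItems, PySem.Set.contains, h]

-- states reachable at a loop head in both programs: fewer than k collected, or nothing collected yet
def pvInv (out : List String) (seen : PySem.Set String) (k : Int) : Prop :=
  (out.length : Int) < k ∨ (out = [] ∧ seen = [])

-- running A's loop on xs ++ ys is: run B's inner loop on xs; if it returned early that is the answer, else continue A on ys
lemma pv_items_step (xs : List String) :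
    ∀ ys out seen k, pvInv out seen k →
      (pvLoopA (xs ++ ys) out seen k =
        (match pvLoopBItems xs out seen k with
         | (o, _, true) => o
         | (o, s, false) => pvLoopA ys o s k)) ∧
      (∀ o s, pvLoopBItems xs out seen k = (o, s, false) → pvInv o s k) := by
  induction xs with
  | nil =>
      intro ys out seen k hinv
      refine ⟨rfl, ?_⟩
      intro o s h
      simp only [pvLoopBItems, Prod.mk.injEq] at h
      obtain ⟨h1, h2, -⟩ := h
      subst h1; subst h2; exact hinv
  | cons x rest ih =>
      intro ys out seen k hinv
      by_cases hmem : x ∈ seen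
      · have hlt : (out.length : Int) < k := by
          rcases hinv with h | ⟨h1, h2⟩
          · exact h
          · subst h2; simp at hmem
        rw [List.cons_append, pvLoopA_cons, if_pos hmem, if_neg (by omega),
            pvLoopBItems_cons, if_pos hmem]
        exact ih ys out seen k (Or.inl hlt)
      · by_cases hk : (out.length : Int) + 1 ≥ k
        · constructor
          · rw [List.cons_append, pvLoopA_cons, if_neg hmem, if_pos hk,
                pvLoopBItems_cons, if_neg hmem, if_pos hk]
          · intro o s h
            rw [pvLoopBItems_cons, if_neg hmem, if_pos hk] at h
            simp at h
        · rw [List.cons_append, pvLoopA_cons, if_neg hmem, if_neg hk,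
              pvLoopBItems_cons, if_neg hmem, if_neg hk]
          exact ih ys (out ++ [x]) (PySem.Set.add seen x) k (Or.inl (by simp; omega))

def pvFlatOf (sections : List (List (String × List String))) : List String :=
  sections.flatMap (fun sec => (PySem.Dict.get? (PySem.Dict.mk sec) "items").getD [])

lemma pv_secs (sections : List (List (String × List String))) :
    ∀ out seen k, pvInv out seen k →
      pvLoopA (pvFlatOf sections) out seen k = pvLoopBSecs sections out seen k := by
  induction sections with
  | nil => intro out seen k _; rfl
  | cons sec rest ih =>
      intro out seen k hinv
      have hflat : pvFlatOf (sec :: rest) =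
          ((PySem.Dict.get? (PySem.Dict.mk sec) "items").getD []) ++ pvFlatOf rest := by
        simp [pvFlatOf]
      rw [hflat]
      obtain ⟨heq, hpres⟩ :=
        pv_items_step ((PySem.Dict.get? (PySem.Dict.mk sec) "items").getD []) (pvFlatOf rest) out seen k hinv
      rw [heq]
      rcases hB : pvLoopBItems ((PySem.Dict.get? (PySem.Dict.mk sec) "items").getD []) out seen k with ⟨o, s, d⟩
      cases d with
      | true => simp [pvLoopBSecs, hB]
      | false =>
          simp only [pvLoopBSecs, hB]
          exact ih o s k (hpres o s hB)

-- A's two flattening loops build exactly the concatenation of the per-section item lists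
lemma pv_flat_eq (sections : List (List (String × List String))) :
    sections.foldl
      (fun acc sec => ((PySem.Dict.get? (PySem.Dict.mk sec) "items").getD []).foldl (fun a it => a ++ [it]) acc) []
    = pvFlatOf sections := by
  simp only [PySem.List.foldl_append_singleton_eq_self]
  rw [PySem.List.foldl_append_eq_flatMap]
  simp [pvFlatOf]

-- ===== VERDICT (by name: the statement is the Claim_ definition above) =====
theorem collect_key_skills_py_spec : Claim_equal_collect_key_skills_py := by
  intro sections k _
  unfold Spec_collect_key_skills_py collect_key_skills_py collect_key_skills_py_alt
  rw [pv_flat_eq]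
  exact pv_secs sections [] PySem.Set.empty k (Or.inr ⟨rfl, rfl⟩)
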